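-- pv_equiv track=rewrite | github.com/wyk18703232953/myResearch | codeComplex/data/filteredData/python/quadratic/python_quadratic_0416.py | solve
-- ===== SOURCE A (Python) =====
-- def build_string(n, k):
--     # Deterministically generate a string of length n over 'a'..'z'
--     if n <= 0:
--         return ""
--     chars = []
--     for i in range(n):
--         # simple periodic pattern
--         chars.append(chr(ord('a') + (i % 26)))
--     return "".join(chars)
--
-- def solve(n, k):
--     s = build_string(n, k)
--     ans = ""
--     for i in range(len(s) + 1, 0, -1):
--         res = s
--         end = s[-i:]
--         for _ in range(k - 1):
--             res += end
--         cnt = 0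
--         for j in range(len(res) - len(s) + 1):
--             if res[j:j + len(s)] == s:
--                 cnt += 1
--         if cnt == k:
--             ans = res
--     return ans
-- ===== SOURCE B (Python) =====
-- def solve(n, k):
--     # Period analysis instead of search: the pattern 'abc...z abc...' has smallest
--     # period p = min(n, 26); appending its length-p suffix k-1 times yields exactly
--     # k occurrences of s, and no shorter suffix extension can, so the answer is
--     # closed-form: s + s[n-p:] * (k-1)  (empty when n <= 0 or k <= 0).
--     if n <= 0 or k <= 0:
--         return ""
--     p = 26 if n >= 26 else n
--     s = "".join(chr(97 + m % 26) for m in range(n))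
--     return s + s[n - p:] * (k - 1)
-- ===== Notes on version B (the rewrite author's own statement) =====
-- stated objective: faster
-- what changed: B replaces A's search over all suffix lengths with occurrence counting by a period analysis of the generated pattern: its smallest period is p = min(n, 26), so the answer is the closed form s + s[n-p:]*(k-1) with no search and no counting at all.
import Mathlib
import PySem

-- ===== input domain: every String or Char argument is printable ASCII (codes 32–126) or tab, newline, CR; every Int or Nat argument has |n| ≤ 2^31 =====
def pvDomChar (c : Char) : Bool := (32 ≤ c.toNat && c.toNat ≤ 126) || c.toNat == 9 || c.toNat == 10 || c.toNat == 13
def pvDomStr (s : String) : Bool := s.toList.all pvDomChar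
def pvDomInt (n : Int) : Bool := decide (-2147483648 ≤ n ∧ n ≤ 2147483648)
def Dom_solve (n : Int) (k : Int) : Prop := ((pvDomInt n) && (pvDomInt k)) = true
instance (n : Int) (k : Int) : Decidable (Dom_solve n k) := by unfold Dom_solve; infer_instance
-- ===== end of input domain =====

-- B replaces A's brute-force search-and-count over all suffix lengths with a period
-- analysis of the generated pattern (smallest period p = min(n, 26)) and returns the
-- closed form s + s[n-p:]*(k-1) directly; measurably faster.

-- ===== PORT A =====
-- build_string(n, k): deterministic periodic string over 'a'..'z' (ported as List Char)
def pvBuildA (n : Int) (_k : Int) : List Char :=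
  if n ≤ 0 then []
  else (PySem.List.pyRange 0 n 1).map (fun i => Char.ofNat (97 + (PySem.Int.mod i 26).toNat))

-- res = s; for _ in range(k-1): res += end   (end = s[-i:])
def pvResA (s : List Char) (k : Int) (i : Int) : List Char :=
  (PySem.List.pyRange 0 (k - 1) 1).foldl
    (fun r _ => r ++ PySem.Chars.slice s (some (-i)) none) s

-- cnt = 0; for j in range(len(res)-len(s)+1): if res[j:j+len(s)] == s: cnt += 1
def pvCntA (s : List Char) (res : List Char) : Int :=
  (PySem.List.pyRange 0 ((res.length : Int) - (s.length : Int) + 1) 1).foldl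
    (fun c j =>
      if PySem.Chars.slice res (some j) (some (j + (s.length : Int))) = s then c + 1 else c) 0

def solve (n : Int) (k : Int) : String :=
  String.ofList
    ((PySem.List.pyRange (((pvBuildA n k).length : Int) + 1) 0 (-1)).foldl
      (fun ans i =>
        if pvCntA (pvBuildA n k) (pvResA (pvBuildA n k) k i) = k
        then pvResA (pvBuildA n k) k i else ans) [])

-- ===== PORT B =====
-- closed form: if n <= 0 or k <= 0 return "", else p = 26 if n >= 26 else n,
-- s = pattern, return s + s[n-p:] * (k-1)
def solve_alt (n : Int) (k : Int) : String :=
  if n ≤ 0 ∨ k ≤ 0 then "" else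
  let p : Int := if 26 ≤ n then 26 else n
  let s : List Char :=
    (PySem.List.pyRange 0 n 1).map (fun m => Char.ofNat (97 + (PySem.Int.mod m 26).toNat))
  String.ofList (s ++ (List.replicate (k - 1).toNat (PySem.Chars.slice s (some (n - p)) none)).flatten)

-- ===== PRECONDITION & SPEC =====
def Spec_solve (n : Int) (k : Int) (out : String) : Prop := out = solve_alt n k
instance (n : Int) (k : Int) (out : String) : Decidable (Spec_solve n k out) := by
  unfold Spec_solve; infer_instance

-- ===== CLAIM (what is proved, stated in full; the proofs are below) =====
def Claim_equal_solve : Prop := ∀ (n : Int) (k : Int), Dom_solve n k → Spec_solve n k (solve n k)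

-- ===== LEMMAS AND PROOFS =====

-- the pattern's character at position m
def pvSC (m : Nat) : Char := Char.ofNat (97 + m % 26)

-- the pattern of length N, its length-i suffix, and the extended candidate string
def pvS (N : Nat) : List Char := (List.range N).map pvSC
def pvE (N i : Nat) : List Char := (pvS N).drop (N - i)
def pvRes (N r i : Nat) : List Char := pvS N ++ (List.replicate r (pvE N i)).flatten

theorem toNat_ofNat_valid (x : Nat) (h : x < 55296) : (Char.ofNat x).toNat = x := by
  unfold Char.ofNat
  rw [dif_pos (Or.inl h)]
  simp [Char.ofNatAux, Char.toNat]

theorem pvSC_eq_iff (a b : Nat) : pvSC a = pvSC b ↔ a % 26 = b % 26 := by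
  constructor
  · intro h
    have h2 : (Char.ofNat (97 + a % 26)).toNat = (Char.ofNat (97 + b % 26)).toNat := by
      rw [show Char.ofNat (97 + a % 26) = Char.ofNat (97 + b % 26) from h]
    rw [toNat_ofNat_valid _ (by omega), toNat_ofNat_valid _ (by omega)] at h2
    omega
  · intro h; unfold pvSC; rw [h]

theorem int_mod26_toNat (j : Nat) : (PySem.Int.mod (j : Int) 26).toNat = j % 26 := by
  rw [PySem.Int.mod, Int.fmod_eq_emod]
  omega

theorem map_eq_pvS (n : Int) :
    (PySem.List.pyRange 0 n 1).map (fun m => Char.ofNat (97 + (PySem.Int.mod m 26).toNat)) =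
      pvS n.toNat := by
  rw [PySem.List.pyRange_zero, List.map_map, pvS]
  apply List.map_congr_left
  intro j _
  simp only [Function.comp_apply, pvSC, int_mod26_toNat]

theorem pvBuild_eq (n k : Int) (h : 0 < n) : pvBuildA n k = pvS n.toNat := by
  rw [pvBuildA, if_neg (by omega)]
  exact map_eq_pvS n

theorem pvS_length (N : Nat) : (pvS N).length = N := by simp [pvS]

theorem pvS_get (N m : Nat) (h : m < N) : (pvS N)[m]? = some (pvSC m) := by
  simp [pvS, h]

theorem pvE_length (N i : Nat) (h : i ≤ N) : (pvE N i).length = i := by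
  simp [pvE, pvS_length]; omega

theorem pvE_get (N i m : Nat) (hi : i ≤ N) (hm : m < i) :
    (pvE N i)[m]? = some (pvSC (N - i + m)) := by
  simp only [pvE, List.getElem?_drop]
  exact pvS_get N _ (by omega)

theorem flatten_replicate_get {α : Type} (e : List α) (r t : Nat) (h : t < r * e.length) :
    ((List.replicate r e).flatten)[t]? = e[t % e.length]? := by
  induction r generalizing t with
  | zero => simp at h
  | succ r ih =>
    rw [Nat.succ_mul] at h
    rw [List.replicate_succ, List.flatten_cons]
    by_cases ht : t < e.length
    · rw [List.getElem?_append_left ht, Nat.mod_eq_of_lt ht]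
    · have hlen : 0 < e.length := by
        rcases Nat.eq_zero_or_pos e.length with h0 | h0
        · rw [h0] at h ht; omega
        · exact h0
      rw [List.getElem?_append_right (by omega)]
      rw [ih (t - e.length) (by omega)]
      rw [← Nat.mod_eq_sub_mod (by omega)]

theorem pvRes_length (N r i : Nat) (h : i ≤ N) : (pvRes N r i).length = N + r * i := by
  simp [pvRes, pvS_length, pvE_length N i h]

theorem pvRes_get_lt (N r i u : Nat) (h : u < N) : (pvRes N r i)[u]? = some (pvSC u) := by
  rw [pvRes, List.getElem?_append_left (by rw [pvS_length]; exact h)]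
  exact pvS_get N u h

theorem pvRes_get_ge (N r i t : Nat) (hi : i ≤ N) (hi0 : 0 < i) (ht : t < r * i) :
    (pvRes N r i)[N + t]? = some (pvSC (N - i + t % i)) := by
  rw [pvRes, List.getElem?_append_right (by rw [pvS_length]; omega)]
  rw [pvS_length, Nat.add_sub_cancel_left]
  rw [flatten_replicate_get (pvE N i) r t (by rw [pvE_length N i hi]; exact ht)]
  rw [pvE_length N i hi]
  exact pvE_get N i _ hi (Nat.mod_lt t hi0)

-- A's repeated concatenation equals the replicate form
theorem foldl_append_replicate {e : List Char} (l : List Int) (r : List Char) :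
    l.foldl (fun r _ => r ++ e) r = r ++ (List.replicate l.length e).flatten := by
  induction l generalizing r with
  | nil => simp
  | cons x xs ih => simp [List.foldl_cons, ih, List.append_assoc, List.replicate_succ]

theorem pvResA_eq (N : Nat) (k : Int) (i : Nat) (hi0 : 0 < i) :
    pvResA (pvS N) k (i : Int) = pvRes N (k - 1).toNat i := by
  rw [pvResA, PySem.Chars.slice, PySem.List.slice_from_neg_natCast _ i hi0, pvS_length]
  rw [foldl_append_replicate, PySem.List.length_pyRange_one]
  rw [pvRes, pvE]
  norm_num

-- pvCntA as a count over a Nat range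
theorem pvCnt_countP (N : Nat) (res : List Char) (h : N ≤ res.length) :
    pvCntA (pvS N) res =
      ((List.range (res.length - N + 1)).countP
        (fun j => decide ((res.drop j).take N = pvS N)) : Nat) := by
  rw [pvCntA]
  have hco := PySem.List.foldl_count_if
    (fun j => decide (PySem.Chars.slice res (some j) (some (j + ((pvS N).length : Int))) = pvS N))
    (PySem.List.pyRange 0 ((res.length : Int) - ((pvS N).length : Int) + 1) 1) 0
  simp only [decide_eq_true_eq] at hco
  rw [hco, zero_add]
  congr 1
  rw [show ((res.length : Int) - ((pvS N).length : Int) + 1) = ((res.length - N + 1 : Nat) : Int)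
      by rw [pvS_length]; push_cast; omega]
  rw [PySem.List.pyRange_zero, Int.toNat_natCast, List.countP_map]
  apply List.countP_congr
  intro j _
  simp only [Function.comp_apply, decide_eq_true_eq]
  rw [PySem.Chars.slice, pvS_length,
      PySem.List.slice_toNat res (by positivity) (by positivity),
      show ((j : Int) + (N : Int)).toNat = j + N by omega, Int.toNat_natCast,
      Nat.add_sub_cancel_left]

-- window characterization
theorem occ_iff (N : Nat) (res : List Char) (j : Nat) :
    (res.drop j).take N = pvS N ↔
      ∀ m, m < N → res[j + m]? = some (pvSC m) := by
  constructor
  · intro hocc m hm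
    have := congrArg (fun l => l[m]?) hocc
    simp only [List.getElem?_take, hm, if_pos, List.getElem?_drop] at this
    rw [this, pvS_get N m hm]
  · intro H
    apply List.ext_getElem?
    intro u
    rw [List.getElem?_take]
    by_cases hu : u < N
    · rw [if_pos hu, List.getElem?_drop, H u hu, pvS_get N u hu]
    · rw [if_neg hu, eq_comm]
      exact List.getElem?_eq_none (by rw [pvS_length]; omega)

theorem occ_zero (N r i : Nat) :
    ((pvRes N r i).drop 0).take N = pvS N := by
  rw [occ_iff]
  intro m hm
  rw [Nat.zero_add]
  exact pvRes_get_lt N r i m hm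

-- no occurrence at 1 ≤ j when i is below the smallest period min(N,26)
theorem not_occ (N r i j : Nat) (hi0 : 0 < i) (hi : i < min N 26) (hr : 0 < r)
    (hj0 : 0 < j) (hj : j ≤ r * i) :
    ¬ ((pvRes N r i).drop j).take N = pvS N := by
  intro hocc
  rw [occ_iff] at hocc
  have hiN : i ≤ N := by omega
  have hNpos : 0 < N := by omega
  have hri : 0 < r * i := Nat.mul_pos hr hi0
  by_cases hjN : j < N
  · have h0 := hocc 0 hNpos
    rw [Nat.add_zero, pvRes_get_lt N r i j hjN] at h0
    have hj26 : j % 26 = 0 % 26 := (pvSC_eq_iff j 0).mp (Option.some.inj h0)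
    by_cases hN26 : N ≤ 26
    · omega
    · -- N > 26, hence i < 26; compare position N inside the window
      have hm := hocc (N - j) (by omega)
      rw [show j + (N - j) = N + 0 by omega,
          pvRes_get_ge N r i 0 hiN hi0 hri] at hm
      have := (pvSC_eq_iff _ _).mp (Option.some.inj hm)
      -- (N - i + 0 % i) % 26 = (N - j) % 26, with 26 ∣ j, 1 ≤ i < 26
      rw [Nat.zero_mod, Nat.add_zero] at this
      omega
  · -- window entirely inside the periodic tail: positions j and j + i carry equal chars
    have hiNs : i < N := by omega
    have h0 := hocc 0 hNpos
    rw [Nat.add_zero, show j = N + (j - N) by omega,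
        pvRes_get_ge N r i (j - N) hiN hi0 (by omega)] at h0
    have hmi := hocc i hiNs
    rw [show j + i = N + (j - N + i) by omega,
        pvRes_get_ge N r i (j - N + i) hiN hi0 (by omega),
        Nat.add_mod_right] at hmi
    have e0 := (pvSC_eq_iff _ _).mp (Option.some.inj h0)
    have ei := (pvSC_eq_iff _ _).mp (Option.some.inj hmi)
    omega

-- at i = min(N,26) the candidate string is fully periodic with period min(N,26)
theorem pvRes_get_mod (N r u : Nat) (hN : 0 < N) (hu : u < N + r * min N 26) :
    (pvRes N r (min N 26))[u]? = some (pvSC (u % min N 26)) := by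
  have hPN : min N 26 ≤ N := Nat.min_le_left N 26
  have hP0 : 0 < min N 26 := by omega
  by_cases hu' : u < N
  · rw [pvRes_get_lt N r _ u hu']
    congr 1
    rw [pvSC_eq_iff]
    by_cases h26 : 26 ≤ N
    · rw [Nat.min_eq_right h26]; omega
    · rw [Nat.min_eq_left (by omega), Nat.mod_eq_of_lt hu']
  · rw [show u = N + (u - N) by omega,
        pvRes_get_ge N r _ (u - N) hPN hP0 (by omega)]
    congr 1
    rw [pvSC_eq_iff]
    by_cases h26 : 26 ≤ N
    · rw [Nat.min_eq_right h26]; omega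
    · rw [Nat.min_eq_left (by omega)]
      rw [Nat.sub_self, Nat.zero_add, Nat.add_mod_left]

theorem occ_period (N r j : Nat) (hN : 0 < N) (hj : j ≤ r * min N 26) :
    (((pvRes N r (min N 26)).drop j).take N = pvS N) ↔ (min N 26) ∣ j := by
  have hPN : min N 26 ≤ N := Nat.min_le_left N 26
  have hP26 : min N 26 ≤ 26 := Nat.min_le_right N 26
  have hP0 : 0 < min N 26 := by omega
  rw [occ_iff]
  constructor
  · intro H
    have h0 := H 0 hN
    rw [Nat.add_zero, pvRes_get_mod N r j hN (by omega)] at h0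
    have := (pvSC_eq_iff _ _).mp (Option.some.inj h0)
    have hlt : j % min N 26 < min N 26 := Nat.mod_lt _ hP0
    exact Nat.dvd_of_mod_eq_zero (by omega)
  · intro hdvd m hm
    rw [pvRes_get_mod N r (j + m) hN (by omega)]
    congr 1
    rw [pvSC_eq_iff]
    by_cases h26 : 26 ≤ N
    · rw [Nat.min_eq_right h26] at hdvd ⊢
      omega
    · rw [Nat.min_eq_left (by omega)] at hdvd ⊢
      rw [Nat.add_mod, Nat.dvd_iff_mod_eq_zero.mp hdvd, Nat.zero_add,
          Nat.mod_eq_of_lt hm, Nat.mod_eq_of_lt hm]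

-- counting
theorem countP_multiples (p r : Nat) (hp : 0 < p) :
    (List.range (r * p + 1)).countP (fun j => decide (p ∣ j)) = r + 1 := by
  induction r with
  | zero => simp
  | succ r ih =>
    rw [show (r + 1) * p + 1 = (r * p + 1) + p by ring, List.range_add,
        List.countP_append, ih, List.countP_map]
    have h1 : (List.range p).countP ((fun j => decide (p ∣ j)) ∘ (fun x => r * p + 1 + x)) =
        (List.range p).countP (fun x => x == p - 1) := by
      apply List.countP_congr
      intro x hx
      have hxp : x < p := List.mem_range.mp hx
      simp only [Function.comp_apply, decide_eq_true_eq, beq_iff_eq]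
      constructor
      · intro hd
        have hd' : p ∣ r * p + (1 + x) := by
          rw [show r * p + (1 + x) = r * p + 1 + x by ring]; exact hd
        have hd1 : p ∣ 1 + x := (Nat.dvd_add_right (dvd_mul_left p r)).mp hd'
        have := Nat.le_of_dvd (by omega) hd1
        omega
      · intro hx1
        subst hx1
        exact ⟨r + 1, by have h2 : r * p + 1 + (p - 1) = r * p + p := by omega
                         rw [h2]; ring⟩
    rw [h1]
    have : (List.range p).countP (fun x => x == p - 1) = List.count (p - 1) (List.range p) := by
      rfl
    rw [this, List.count_eq_one_of_mem (List.nodup_range) (List.mem_range.mpr (by omega))]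

theorem countP_only_zero (M : Nat) (f : Nat → Bool) (h0 : f 0 = true)
    (h : ∀ j, 0 < j → j < M → f j = false) (hM : 0 < M) :
    (List.range M).countP f = 1 := by
  obtain ⟨M', rfl⟩ : ∃ M', M = M' + 1 := ⟨M - 1, by omega⟩
  rw [List.range_succ_eq_map, List.countP_cons, h0, List.countP_map]
  have : (List.range M').countP (f ∘ Nat.succ) = 0 := by
    rw [List.countP_eq_zero]
    intro a ha
    simp only [Function.comp_apply]
    rw [h (a + 1) (by omega) (by have := List.mem_range.mp ha; omega)]
    simp
  rw [this]
  simp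

-- the descending overwrite fold equals an ascending first-match scan
def pvScan (s : List Char) (k : Int) : List Int → List Char
  | [] => []
  | i :: rest =>
    if pvCntA s (pvResA s k i) = k then pvResA s k i else pvScan s k rest

theorem foldl_reverse_eq_scan (s : List Char) (k : Int) (l : List Int) :
    l.reverse.foldl
      (fun ans i => if pvCntA s (pvResA s k i) = k then pvResA s k i else ans) [] =
    pvScan s k l := by
  induction l with
  | nil => simp [pvScan]
  | cons x xs ih =>
    rw [List.reverse_cons, List.foldl_append, ih]
    simp only [List.foldl_cons, List.foldl_nil, pvScan]

theorem pvScan_append_fail (s : List Char) (k : Int) (l1 l2 : List Int)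
    (h : ∀ i ∈ l1, pvCntA s (pvResA s k i) ≠ k) :
    pvScan s k (l1 ++ l2) = pvScan s k l2 := by
  induction l1 with
  | nil => simp
  | cons x xs ih =>
    simp only [List.cons_append, pvScan]
    rw [if_neg (h x (List.mem_cons_self))]
    exact ih (fun i hi => h i (List.mem_cons_of_mem x hi))

-- cnt of the unextended string is 1 (covers k ≤ 1, where no copies are appended)
theorem cnt_self (N : Nat) : pvCntA (pvS N) (pvS N) = 1 := by
  rw [pvCnt_countP N (pvS N) (by rw [pvS_length])]
  rw [pvS_length, Nat.sub_self, Nat.zero_add, List.range_one]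
  rw [List.countP_cons, List.countP_nil]
  rw [decide_eq_true (by rw [List.drop_zero]; exact List.take_of_length_le (by rw [pvS_length]))]
  rfl

theorem resA_of_k_le_one (s : List Char) (k : Int) (i : Int) (h : k ≤ 1) :
    pvResA s k i = s := by
  rw [pvResA, PySem.List.pyRange_one_eq_nil (by omega)]
  rfl

-- B's closed form, normalized
theorem solve_alt_eq (n k : Int) (hn : 0 < n) (hk : 1 ≤ k) :
    solve_alt n k = String.ofList (pvRes n.toNat (k - 1).toNat (min n.toNat 26)) := by
  rw [solve_alt, if_neg (by omega)]
  simp only [map_eq_pvS]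
  rw [PySem.Chars.slice,
      PySem.List.slice_from _ (show (0:Int) ≤ n - (if 26 ≤ n then 26 else n) by split <;> omega)]
  rw [show (n - (if 26 ≤ n then 26 else n)).toNat = n.toNat - min n.toNat 26 by split <;> omega]
  rw [pvRes, pvE]

-- the count at suffix length i = min(N,26) is exactly k (for k ≥ 2)
theorem cnt_at_period (N : Nat) (k : Int) (hN : 1 ≤ N) (hk : 2 ≤ k) :
    pvCntA (pvS N) (pvRes N (k - 1).toNat (min N 26)) = k := by
  have hPN : min N 26 ≤ N := Nat.min_le_left N 26
  rw [pvCnt_countP N _ (by rw [pvRes_length N _ _ hPN]; omega)]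
  rw [pvRes_length N _ _ hPN, Nat.add_sub_cancel_left]
  have hc : (List.range ((k - 1).toNat * min N 26 + 1)).countP
      (fun j => decide (((pvRes N (k - 1).toNat (min N 26)).drop j).take N = pvS N)) =
      (List.range ((k - 1).toNat * min N 26 + 1)).countP (fun j => decide ((min N 26) ∣ j)) := by
    apply List.countP_congr
    intro j hj
    simp only [decide_eq_true_eq]
    exact occ_period N (k - 1).toNat j (by omega) (by have := List.mem_range.mp hj; omega)
  rw [hc, countP_multiples (min N 26) (k - 1).toNat (by omega)]
  omega

-- the count at any smaller suffix length is 1 (for k ≥ 2)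
theorem cnt_below_period (N : Nat) (k : Int) (i : Nat) (hi0 : 0 < i) (hi : i < min N 26)
    (hk : 2 ≤ k) :
    pvCntA (pvS N) (pvRes N (k - 1).toNat i) = 1 := by
  have hiN : i ≤ N := by omega
  have hr1 : 1 ≤ (k - 1).toNat := by omega
  rw [pvCnt_countP N _ (by rw [pvRes_length N _ _ hiN]; omega)]
  rw [pvRes_length N _ _ hiN, Nat.add_sub_cancel_left]
  rw [countP_only_zero _ _ (decide_eq_true (occ_zero N _ i))
       (fun j hj0 hjM => decide_eq_false (not_occ N _ i j hi0 hi hr1 hj0 (by omega)))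
       (by omega)]
  rfl

-- ===== VERDICT (by name: the statement is the Claim_ definition above) =====
theorem solve_spec : Claim_equal_solve := by
  intro n k _
  unfold Spec_solve
  by_cases hn : n ≤ 0
  · -- s is empty: A's single iteration keeps or overwrites with the empty list; B gives ""
    rw [solve, solve_alt, if_pos (Or.inl hn), pvBuildA, if_pos hn]
    simp only [List.length_nil, Nat.cast_zero, zero_add]
    rw [PySem.List.pyRange_neg_one_cons (by omega), PySem.List.pyRange_neg_one_eq_nil (by omega)]
    have hres : pvResA [] k 1 = [] := by
      rw [pvResA, foldl_append_replicate]
      simp [PySem.Chars.slice, PySem.List.slice_from_neg_one]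
    rw [List.foldl_cons, List.foldl_nil, hres]
    rw [show ([] : List Char) = pvS 0 by simp [pvS], cnt_self 0]
    split <;> rfl
  · rw [not_le] at hn
    have hN1 : 1 ≤ n.toNat := by omega
    rw [solve, pvBuild_eq n k hn, pvS_length]
    rw [PySem.List.pyRange_neg_one_eq_reverse, foldl_reverse_eq_scan]
    rw [show ((0:Int) + 1) = 1 by ring,
        show ((n.toNat : Int) + 1 + 1) = (n.toNat : Int) + 2 by ring]
    by_cases hk : k ≤ 0
    · -- cnt is always 1 ≠ k: the scan exhausts and A returns ""
      rw [solve_alt, if_pos (Or.inr hk)]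
      rw [show PySem.List.pyRange 1 ((n.toNat : Int) + 2) 1
            = PySem.List.pyRange 1 ((n.toNat : Int) + 2) 1 ++ [] by simp]
      rw [pvScan_append_fail _ _ _ _ (fun i _ => by
            rw [resA_of_k_le_one _ _ _ (by omega), cnt_self]; omega)]
      rfl
    · rw [not_le] at hk
      by_cases hk1 : k = 1
      · -- the very first suffix length already matches: A returns s; B's repeat count is 0
        subst hk1
        rw [PySem.List.pyRange_one_cons (by omega)]
        simp only [pvScan]
        rw [resA_of_k_le_one _ _ _ (by omega), cnt_self, if_pos rfl]
        rw [solve_alt_eq n 1 hn (by omega)]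
        simp [pvRes]
      · have hk2 : 2 ≤ k := by omega
        have hPN : min n.toNat 26 ≤ n.toNat := Nat.min_le_left _ 26
        have hP1 : 1 ≤ min n.toNat 26 := by omega
        rw [PySem.List.pyRange_one_append 1 ((min n.toNat 26 : Nat) : Int) ((n.toNat : Int) + 2)
              (by omega) (by omega)]
        rw [pvScan_append_fail _ _ _ _ (fun i hi => by
              have hmem := (PySem.List.mem_pyRange_one).mp hi
              have hi' : i = ((i.toNat : Nat) : Int) := by omega
              rw [hi', pvResA_eq n.toNat k i.toNat (by omega),
                  cnt_below_period n.toNat k i.toNat (by omega) (by omega) hk2]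
              omega)]
        rw [PySem.List.pyRange_one_cons (by omega)]
        simp only [pvScan]
        rw [pvResA_eq n.toNat k (min n.toNat 26) (by omega),
            if_pos (cnt_at_period n.toNat k hN1 hk2)]
        rw [solve_alt_eq n k hn (by omega)]
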